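-- pv_equiv track=rewrite | github.com/lukerf89/invoice-processor-fn | main.py | validate_quantity_distribution
-- ===== SOURCE A (Python) =====
-- def validate_quantity_distribution(distribution):
--     """
--     Validate if quantity distribution across products is realistic.
--
--     Args:
--         distribution (dict): Product code -> quantity mapping
--
--     Returns:
--         bool: True if distribution appears realistic
--     """
--
--     if not distribution:
--         return True
--
--     quantities = list(distribution.values())
--
--     # If all quantities are the same, it's suspicious
--     if len(set(quantities)) == 1:
--         return False
--
--     # Check for suspicious arithmetic progression patterns
--     if len(quantities) >= 4:  # Only check for 4+ items
--         sorted_qtys = sorted(quantities)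
--         # Check if it's a perfect arithmetic sequence with large gaps
--         differences = [
--             sorted_qtys[i + 1] - sorted_qtys[i] for i in range(len(sorted_qtys) - 1)
--         ]
--         if len(set(differences)) == 1 and differences[0] >= 12:
--             # Perfect arithmetic sequence with steps of 12+ is suspicious
--             return False
--
--     # Check for unrealistic high quantities
--     if any(q > 500 for q in quantities):
--         return False
--
--     return True
-- ===== SOURCE B (Python) =====
-- def validate_quantity_distribution(distribution):
--     if not distribution:
--         return True
--     quantities = list(distribution.values())
--     s = set(quantities)
--     if len(s) == 1:
--         return False
--     n = len(quantities)
--     if n >= 4 and len(s) == n and (max(s) - min(s)) % (n - 1) == 0: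
--         lo = min(s)
--         step = (max(s) - lo) // (n - 1)
--         if step >= 12 and all(lo + i * step in s for i in range(n)):
--             return False
--     if any(q > 500 for q in quantities):
--         return False
--     return True
-- ===== Notes on version B (the rewrite author's own statement) =====
-- stated objective: alternative
-- what changed: The 4+-item arithmetic-progression test no longer sorts and builds a differences list: B reconstructs the progression from min, max and the size of the value set and checks each expected element for membership, replacing the O(n log n) sort pass with linear min/max/set scans.
import Mathlib
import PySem

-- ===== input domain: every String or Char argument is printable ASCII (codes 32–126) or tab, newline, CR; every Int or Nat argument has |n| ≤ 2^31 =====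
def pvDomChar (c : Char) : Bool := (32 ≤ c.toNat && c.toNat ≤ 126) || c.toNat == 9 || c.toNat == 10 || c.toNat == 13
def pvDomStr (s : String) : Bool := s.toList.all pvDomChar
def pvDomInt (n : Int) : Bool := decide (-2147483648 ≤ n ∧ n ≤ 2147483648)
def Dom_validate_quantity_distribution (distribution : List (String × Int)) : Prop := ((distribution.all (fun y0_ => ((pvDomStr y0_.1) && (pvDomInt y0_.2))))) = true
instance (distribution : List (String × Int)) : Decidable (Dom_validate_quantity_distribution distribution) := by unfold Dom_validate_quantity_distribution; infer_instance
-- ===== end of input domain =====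

-- B replaces A's sort-and-differences arithmetic-progression test by a sort-free
-- min/max/set-membership reconstruction of the progression (objective: alternative, no sort).

-- ===== PORT A =====
-- literal transliteration of A; every list index used below is in range, so `getD _ 0` is exact for Python's indexing
def validate_quantity_distribution (distribution : List (String × Int)) : Bool :=
  if distribution.isEmpty then true
  else
    let quantities := distribution.map Prod.snd
    if (PySem.Set.ofList quantities).length == 1 then false
    else if (4 ≤ quantities.length) &&
        (let sorted_qtys := PySem.List.sorted quantities (fun x => x) false
         let differences := (List.range (sorted_qtys.length - 1)).map
            (fun i => sorted_qtys.getD (i + 1) 0 - sorted_qtys.getD i 0)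
         ((PySem.Set.ofList differences).length == 1) && decide (12 ≤ differences.headD 0)) then false
    else if quantities.any (fun q => decide (500 < q)) then false
    else true

-- ===== PORT B =====
-- transliteration of Source B: no sort; min/max of the value set, divisibility of the span,
-- then membership of every reconstructed progression element
def validate_quantity_distribution_alt (distribution : List (String × Int)) : Bool :=
  if distribution.isEmpty then true
  else
    let quantities := distribution.map Prod.snd
    let s := PySem.Set.ofList quantities
    if s.length == 1 then false
    else
      let n := quantities.length
      if (4 ≤ n) &&
          ((s.length == n) &&
           ((PySem.Int.mod (((PySem.List.max? s (fun x => x)).getD 0) - ((PySem.List.min? s (fun x => x)).getD 0)) ((n : Int) - 1) == 0) &&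
            (let lo := (PySem.List.min? s (fun x => x)).getD 0
             let step := PySem.Int.floordiv (((PySem.List.max? s (fun x => x)).getD 0) - lo) ((n : Int) - 1)
             decide (12 ≤ step) && (List.range n).all (fun i => PySem.Set.contains s (lo + (i : Int) * step)))))
      then false
      else if quantities.any (fun q => decide (500 < q)) then false
      else true

-- ===== PRECONDITION & SPEC =====
def Spec_validate_quantity_distribution (distribution : List (String × Int)) (out : Bool) : Prop := out = validate_quantity_distribution_alt distribution
instance (distribution : List (String × Int)) (out : Bool) : Decidable (Spec_validate_quantity_distribution distribution out) := by unfold Spec_validate_quantity_distribution; infer_instance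

-- ===== CLAIM (what is proved, stated in full; the proofs are below) =====
def Claim_equal_validate_quantity_distribution : Prop := ∀ (distribution : List (String × Int)), Dom_validate_quantity_distribution distribution → Spec_validate_quantity_distribution distribution (validate_quantity_distribution distribution)

-- ===== LEMMAS AND PROOFS =====

-- the sorted quantities, A's difference list, and the two AP-test booleans (definitionally
-- the subterms of the two ports; used only by the proofs)
def pvT (qs : List Int) : List Int := PySem.List.sorted qs (fun x => x) false

def pvDiffs (qs : List Int) : List Int :=
  (List.range ((pvT qs).length - 1)).map (fun i => (pvT qs).getD (i + 1) 0 - (pvT qs).getD i 0)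

def pvAcond (qs : List Int) : Bool :=
  ((PySem.Set.ofList (pvDiffs qs)).length == 1) && decide (12 ≤ (pvDiffs qs).headD 0)

def pvBcond (qs : List Int) : Bool :=
  ((PySem.Set.ofList qs).length == qs.length) &&
   ((PySem.Int.mod (((PySem.List.max? (PySem.Set.ofList qs) (fun x => x)).getD 0) - ((PySem.List.min? (PySem.Set.ofList qs) (fun x => x)).getD 0)) ((qs.length : Int) - 1) == 0) &&
    (decide (12 ≤ PySem.Int.floordiv (((PySem.List.max? (PySem.Set.ofList qs) (fun x => x)).getD 0) - ((PySem.List.min? (PySem.Set.ofList qs) (fun x => x)).getD 0)) ((qs.length : Int) - 1)) &&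
     (List.range qs.length).all (fun i => PySem.Set.contains (PySem.Set.ofList qs) (((PySem.List.min? (PySem.Set.ofList qs) (fun x => x)).getD 0) + (i : Int) * PySem.Int.floordiv (((PySem.List.max? (PySem.Set.ofList qs) (fun x => x)).getD 0) - ((PySem.List.min? (PySem.Set.ofList qs) (fun x => x)).getD 0)) ((qs.length : Int) - 1)))))

-- the arithmetic progression a, a+d, …, a+(n-1)d
def pvAP (a d : Int) (n : Nat) : List Int := (List.range n).map (fun (i : Nat) => a + (i : Int) * d)

-- the property both AP tests detect: the quantities are a permutation of a perfect
-- arithmetic progression with step ≥ 12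
def pvIsBigAP (qs : List Int) : Prop := ∃ a d : Int, 12 ≤ d ∧ qs.Perm (pvAP a d qs.length)

theorem pvAP_length (a d : Int) (n : Nat) : (pvAP a d n).length = n := by simp [pvAP]

theorem pvAP_getD (a d : Int) (n i : Nat) (h : i < n) :
    (pvAP a d n).getD i 0 = a + (i : Int) * d := by
  have hlen : i < (pvAP a d n).length := by rw [pvAP_length]; exact h
  rw [List.getD_eq_getElem _ _ hlen]
  unfold pvAP
  rw [List.getElem_map, List.getElem_range]

theorem pvAP_mem (a d : Int) (n : Nat) (x : Int) :
    x ∈ pvAP a d n ↔ ∃ i : Nat, i < n ∧ x = a + (i : Int) * d := by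
  simp [pvAP, eq_comm]

theorem pvAP_pairwise (a : Int) {d : Int} (hd : 0 < d) (n : Nat) :
    (pvAP a d n).Pairwise (fun x y => x < y) := by
  rw [pvAP, List.pairwise_map]
  refine List.pairwise_lt_range.imp ?_
  intro i j hij
  have : (i : Int) < (j : Int) := by exact_mod_cast hij
  nlinarith

theorem pvAP_nodup (a : Int) {d : Int} (hd : 0 < d) (n : Nat) : (pvAP a d n).Nodup :=
  (pvAP_pairwise a hd n).imp (fun h => ne_of_lt h)

theorem nodup_eq_singleton {l : List Int} {d : Int} (hn : l.Nodup) (hd : d ∈ l)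
    (h : ∀ x ∈ l, x = d) : l = [d] := by
  cases l with
  | nil => cases hd
  | cons c cs =>
    have hc : c = d := h c (by simp)
    subst hc
    cases cs with
    | nil => rfl
    | cons e es =>
      have he : e = c := h e (by simp)
      simp [he] at hn

theorem set_len_one_iff (ds : List Int) (hne : ds ≠ []) :
    (PySem.Set.ofList ds).length = 1 ↔ ∀ x ∈ ds, x = ds.headD 0 := by
  obtain ⟨c, cs, rfl⟩ := List.exists_cons_of_ne_nil hne
  have hd : (c :: cs).headD 0 ∈ PySem.Set.ofList (c :: cs) := by
    refine (PySem.Set.mem_ofList ..).mpr ?_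
    simp
  constructor
  · intro h
    obtain ⟨e, he⟩ := List.length_eq_one_iff.mp h
    intro x hx
    have hx' : x ∈ PySem.Set.ofList (c :: cs) := (PySem.Set.mem_ofList ..).mpr hx
    rw [he] at hx' hd
    simp at hx' hd
    rw [hx', ← hd]
    rfl
  · intro h
    have : PySem.Set.ofList (c :: cs) = [(c :: cs).headD 0] := by
      refine nodup_eq_singleton (PySem.Set.nodup_ofList ..) hd ?_
      intro x hx
      exact h x ((PySem.Set.mem_ofList ..).mp hx)
    rw [this]; rfl

theorem getD_step (t : List Int) (d : Int)
    (h : ∀ i : Nat, i + 1 < t.length → t.getD (i + 1) 0 - t.getD i 0 = d) :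
    ∀ i : Nat, i < t.length → t.getD i 0 = t.getD 0 0 + (i : Int) * d := by
  intro i
  induction i with
  | zero => intro _; simp
  | succ k ih =>
    intro hlt
    have hk := ih (Nat.lt_of_succ_lt hlt)
    have hs := h k hlt
    push_cast
    linarith

theorem A_iff (qs : List Int) (h4 : 4 ≤ qs.length) : pvAcond qs = true ↔ pvIsBigAP qs := by
  have ht : (pvT qs).length = qs.length := PySem.List.length_sorted ..
  have hperm : (pvT qs).Perm qs := PySem.List.sorted_perm ..
  have hne : pvDiffs qs ≠ [] := by
    simp [pvDiffs, ht]
    omega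
  have hhead : (pvDiffs qs).headD 0 = (pvT qs).getD 1 0 - (pvT qs).getD 0 0 := by
    have h1 : (pvT qs).length - 1 = ((pvT qs).length - 2) + 1 := by omega
    rw [pvDiffs, h1, List.range_succ_eq_map]
    simp
  rw [pvAcond, Bool.and_eq_true, beq_iff_eq, decide_eq_true_eq, set_len_one_iff _ hne]
  constructor
  · rintro ⟨hconst, h12⟩
    set d := (pvDiffs qs).headD 0 with hd
    refine ⟨(pvT qs).getD 0 0, d, h12, ?_⟩
    have hstep : ∀ i : Nat, i + 1 < (pvT qs).length →
        (pvT qs).getD (i + 1) 0 - (pvT qs).getD i 0 = d := by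
      intro i hi
      refine hconst _ ?_
      rw [pvDiffs]
      refine List.mem_map.mpr ⟨i, ?_, rfl⟩
      rw [List.mem_range]; omega
    have hAP := getD_step (pvT qs) d hstep
    have hTeq : pvT qs = pvAP ((pvT qs).getD 0 0) d qs.length := by
      apply List.ext_getElem (by rw [ht, pvAP_length])
      intro i hi hi'
      rw [← List.getD_eq_getElem _ 0 hi, ← List.getD_eq_getElem _ 0 hi',
        hAP i hi, pvAP_getD _ _ _ _ (by rwa [ht] at hi)]
    have hq := hperm.symm
    rw [hTeq] at hq
    exact hq
  · rintro ⟨a, d, h12, hqs⟩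
    have hd0 : (0 : Int) < d := by omega
    have hTeq : pvT qs = pvAP a d qs.length :=
      PySem.List.sorted_eq_of_perm_of_pairwise_lt qs (pvAP a d qs.length) (fun x => x)
        hqs.symm (pvAP_pairwise a hd0 qs.length)
    have hdiff : ∀ x ∈ pvDiffs qs, x = d := by
      intro x hx
      rw [pvDiffs] at hx
      obtain ⟨i, hi, rfl⟩ := List.mem_map.mp hx
      rw [List.mem_range] at hi
      have hi1 : i + 1 < qs.length := by omega
      rw [hTeq, pvAP_getD _ _ _ _ hi1, pvAP_getD _ _ _ _ (by omega)]
      push_cast; ring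
    have hd' : (pvDiffs qs).headD 0 = d := by
      refine hdiff _ ?_
      cases h : pvDiffs qs with
      | nil => exact absurd h hne
      | cons c cs => simp
    refine ⟨fun x hx => (hdiff x hx).trans hd'.symm, by omega⟩

theorem B_iff (qs : List Int) (h4 : 4 ≤ qs.length) : pvBcond qs = true ↔ pvIsBigAP qs := by
  have hnodup_s : (PySem.Set.ofList qs).Nodup := PySem.Set.nodup_ofList ..
  have hmem_s : ∀ x : Int, x ∈ PySem.Set.ofList qs ↔ x ∈ qs := fun x => PySem.Set.mem_ofList ..
  have hfin : (PySem.Set.ofList qs).toFinset = qs.toFinset :=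
    Finset.ext fun x => by simp only [List.mem_toFinset]; exact hmem_s x
  have hpos : (0 : Int) < (qs.length : Int) - 1 := by
    have : (4 : Int) ≤ (qs.length : Int) := by exact_mod_cast h4
    omega
  rw [pvBcond]
  simp only [Bool.and_eq_true, beq_iff_eq, decide_eq_true_eq, List.all_eq_true,
    List.mem_range, PySem.Set.contains_iff, PySem.Int.mod_eq_zero_iff_dvd]
  constructor
  · rintro ⟨hlen, hdvd, h12, hall⟩
    have hsne : PySem.Set.ofList qs ≠ [] := by
      intro h; rw [h] at hlen; simp at hlen; omega
    obtain ⟨m, hmo⟩ : ∃ m, PySem.List.min? (PySem.Set.ofList qs) (fun x => x) = some m := by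
      cases h : PySem.List.min? (PySem.Set.ofList qs) (fun x => x) with
      | none => exact absurd ((PySem.List.min?_eq_none_iff ..).mp h) hsne
      | some m => exact ⟨m, rfl⟩
    obtain ⟨M, hMo⟩ : ∃ M, PySem.List.max? (PySem.Set.ofList qs) (fun x => x) = some M := by
      cases h : PySem.List.max? (PySem.Set.ofList qs) (fun x => x) with
      | none => exact absurd ((PySem.List.max?_eq_none_iff ..).mp h) hsne
      | some M => exact ⟨M, rfl⟩
    rw [hmo, hMo] at hdvd h12 hall
    simp only [Option.getD_some] at hdvd h12 hall
    obtain ⟨c, hc⟩ := hdvd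
    have hstep : PySem.Int.floordiv (M - m) ((qs.length : Int) - 1) = c := by
      rw [hc, PySem.Int.floordiv_eq_ediv_of_pos hpos, Int.mul_ediv_cancel_left _ (ne_of_gt hpos)]
    rw [hstep] at h12 hall
    have hnq : qs.Nodup := by
      have hded : qs.dedup.length = qs.length := by
        calc qs.dedup.length = qs.toFinset.card := (List.card_toFinset qs).symm
          _ = (PySem.Set.ofList qs).toFinset.card := by rw [hfin]
          _ = (PySem.Set.ofList qs).length := List.toFinset_card_of_nodup hnodup_s
          _ = qs.length := hlen
      have := List.Sublist.eq_of_length (List.dedup_sublist qs) hded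
      exact this ▸ List.nodup_dedup qs
    have hperm_s_qs : (PySem.Set.ofList qs).Perm qs :=
      List.perm_of_nodup_nodup_toFinset_eq hnodup_s hnq hfin
    have hsubAP : pvAP m c qs.length ⊆ PySem.Set.ofList qs := by
      intro x hx
      obtain ⟨i, hi, rfl⟩ := (pvAP_mem ..).mp hx
      exact hall i hi
    have hpermAP : (pvAP m c qs.length).Perm (PySem.Set.ofList qs) := by
      refine (List.subperm_of_subset (pvAP_nodup m (by omega) qs.length) hsubAP).perm_of_length_le ?_
      rw [pvAP_length, hlen]
    exact ⟨m, c, h12, hperm_s_qs.symm.trans hpermAP.symm⟩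
  · rintro ⟨a, d, h12, hperm⟩
    have hd0 : (0 : Int) < d := by omega
    have hnq : qs.Nodup := hperm.nodup_iff.mpr (pvAP_nodup a hd0 qs.length)
    have hperm_s_qs : (PySem.Set.ofList qs).Perm qs :=
      List.perm_of_nodup_nodup_toFinset_eq hnodup_s hnq hfin
    have hlen : (PySem.Set.ofList qs).length = qs.length := hperm_s_qs.length_eq
    have hmemAP : ∀ x : Int, x ∈ PySem.Set.ofList qs ↔ x ∈ pvAP a d qs.length :=
      fun x => (hmem_s x).trans hperm.mem_iff
    have hsne : PySem.Set.ofList qs ≠ [] := by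
      intro h; rw [h] at hlen; simp at hlen; omega
    obtain ⟨m, hmo⟩ : ∃ m, PySem.List.min? (PySem.Set.ofList qs) (fun x => x) = some m := by
      cases h : PySem.List.min? (PySem.Set.ofList qs) (fun x => x) with
      | none => exact absurd ((PySem.List.min?_eq_none_iff ..).mp h) hsne
      | some m => exact ⟨m, rfl⟩
    obtain ⟨M, hMo⟩ : ∃ M, PySem.List.max? (PySem.Set.ofList qs) (fun x => x) = some M := by
      cases h : PySem.List.max? (PySem.Set.ofList qs) (fun x => x) with
      | none => exact absurd ((PySem.List.max?_eq_none_iff ..).mp h) hsne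
      | some M => exact ⟨M, rfl⟩
    have hm_eq : m = a := by
      have h1 : m ≤ a := PySem.List.min?_isMin hmo a
        ((hmemAP a).mpr ((pvAP_mem ..).mpr ⟨0, by omega, by simp⟩))
      have h2 : a ≤ m := by
        obtain ⟨i, _, rfl⟩ := (pvAP_mem ..).mp ((hmemAP m).mp (PySem.List.min?_mem hmo))
        have : (0 : Int) ≤ (i : Int) * d := mul_nonneg (Int.natCast_nonneg i) (le_of_lt hd0)
        omega
      omega
    have hM_eq : M = a + ((qs.length : Int) - 1) * d := by
      have hn1 : ((qs.length - 1 : Nat) : Int) = (qs.length : Int) - 1 := by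
        have : 1 ≤ qs.length := by omega
        omega
      have h1 : M ≤ a + ((qs.length : Int) - 1) * d := by
        obtain ⟨i, hi, rfl⟩ := (pvAP_mem ..).mp ((hmemAP M).mp (PySem.List.max?_mem hMo))
        have hle : (i : Int) ≤ (qs.length : Int) - 1 := by omega
        nlinarith
      have h2 : a + ((qs.length : Int) - 1) * d ≤ M := by
        have hmem : a + ((qs.length : Int) - 1) * d ∈ pvAP a d qs.length := by
          refine (pvAP_mem ..).mpr ⟨qs.length - 1, by omega, ?_⟩
          rw [hn1]
        exact PySem.List.max?_isMax hMo _ ((hmemAP _).mpr hmem)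
      omega
    rw [hmo, hMo]
    simp only [Option.getD_some]
    have hD : M - m = ((qs.length : Int) - 1) * d := by rw [hm_eq, hM_eq]; ring
    have hstep : PySem.Int.floordiv (M - m) ((qs.length : Int) - 1) = d := by
      rw [hD, PySem.Int.floordiv_eq_ediv_of_pos hpos, Int.mul_ediv_cancel_left _ (ne_of_gt hpos)]
    refine ⟨hlen, ⟨d, hD⟩, ?_, ?_⟩
    · rw [hstep]; exact h12
    · intro i hi
      rw [hstep, hm_eq]
      exact (hmemAP _).mpr ((pvAP_mem ..).mpr ⟨i, hi, rfl⟩)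

theorem cond_eq (qs : List Int) :
    (decide (4 ≤ qs.length) && pvAcond qs) = (decide (4 ≤ qs.length) && pvBcond qs) := by
  by_cases h4 : 4 ≤ qs.length
  · simp only [h4, decide_true, Bool.true_and]
    rw [Bool.eq_iff_iff, A_iff qs h4, B_iff qs h4]
  · simp [h4]

theorem portA_eq (d : List (String × Int)) :
    validate_quantity_distribution d =
      (if d.isEmpty then true
       else if (PySem.Set.ofList (d.map Prod.snd)).length == 1 then false
       else if decide (4 ≤ (d.map Prod.snd).length) && pvAcond (d.map Prod.snd) then false
       else if (d.map Prod.snd).any (fun q => decide (500 < q)) then false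
       else true) := rfl

theorem portB_eq (d : List (String × Int)) :
    validate_quantity_distribution_alt d =
      (if d.isEmpty then true
       else if (PySem.Set.ofList (d.map Prod.snd)).length == 1 then false
       else if decide (4 ≤ (d.map Prod.snd).length) && pvBcond (d.map Prod.snd) then false
       else if (d.map Prod.snd).any (fun q => decide (500 < q)) then false
       else true) := rfl

-- ===== VERDICT (by name: the statement is the Claim_ definition above) =====
theorem validate_quantity_distribution_spec : Claim_equal_validate_quantity_distribution := by
  intro distribution _
  unfold Spec_validate_quantity_distribution
  rw [portA_eq, portB_eq, cond_eq]
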